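-- pv_equiv track=rewrite | github.com/JoeWolski/agent_hub | src/agent_cli/cli.py | _agent_tools_env_from_entries
-- ===== SOURCE A (Python) =====
-- from typing import Any, Iterable, Iterator, Tuple
--
-- AGENT_TOOLS_URL_ENV = "AGENT_HUB_AGENT_TOOLS_URL"
--
-- AGENT_TOOLS_TOKEN_ENV = "AGENT_HUB_AGENT_TOOLS_TOKEN"
--
-- AGENT_TOOLS_PROJECT_ID_ENV = "AGENT_HUB_AGENT_TOOLS_PROJECT_ID"
--
-- AGENT_TOOLS_CHAT_ID_ENV = "AGENT_HUB_AGENT_TOOLS_CHAT_ID"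
--
-- AGENT_TOOLS_READY_ACK_GUID_ENV = "AGENT_HUB_READY_ACK_GUID"
--
-- def _agent_tools_env_from_entries(entries: Iterable[str]) -> dict[str, str]:
--     env_values: dict[str, str] = {}
--     for entry in entries:
--         key, sep, value = str(entry).partition("=")
--         normalized_key = key.strip()
--         if not normalized_key or not sep:
--             continue
--         if normalized_key in {
--             AGENT_TOOLS_URL_ENV,
--             AGENT_TOOLS_TOKEN_ENV,
--             AGENT_TOOLS_PROJECT_ID_ENV,
--             AGENT_TOOLS_CHAT_ID_ENV,
--             AGENT_TOOLS_READY_ACK_GUID_ENV,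
--         }:
--             env_values[normalized_key] = value.strip()
--
--     return {
--         AGENT_TOOLS_URL_ENV: env_values.get(AGENT_TOOLS_URL_ENV, ""),
--         AGENT_TOOLS_TOKEN_ENV: env_values.get(AGENT_TOOLS_TOKEN_ENV, ""),
--         AGENT_TOOLS_PROJECT_ID_ENV: env_values.get(AGENT_TOOLS_PROJECT_ID_ENV, ""),
--         AGENT_TOOLS_CHAT_ID_ENV: env_values.get(AGENT_TOOLS_CHAT_ID_ENV, ""),
--         AGENT_TOOLS_READY_ACK_GUID_ENV: env_values.get(AGENT_TOOLS_READY_ACK_GUID_ENV, ""),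
--     }
-- ===== SOURCE B (Python) =====
-- AGENT_TOOLS_URL_ENV = "AGENT_HUB_AGENT_TOOLS_URL"
-- AGENT_TOOLS_TOKEN_ENV = "AGENT_HUB_AGENT_TOOLS_TOKEN"
-- AGENT_TOOLS_PROJECT_ID_ENV = "AGENT_HUB_AGENT_TOOLS_PROJECT_ID"
-- AGENT_TOOLS_CHAT_ID_ENV = "AGENT_HUB_AGENT_TOOLS_CHAT_ID"
-- AGENT_TOOLS_READY_ACK_GUID_ENV = "AGENT_HUB_READY_ACK_GUID"
--
-- _KNOWN_KEYS = (
--     AGENT_TOOLS_URL_ENV,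
--     AGENT_TOOLS_TOKEN_ENV,
--     AGENT_TOOLS_PROJECT_ID_ENV,
--     AGENT_TOOLS_CHAT_ID_ENV,
--     AGENT_TOOLS_READY_ACK_GUID_ENV,
-- )
--
--
-- def _agent_tools_env_from_entries(entries):
--     entry_list = [str(entry) for entry in entries]
--     result = {}
--     for known in _KNOWN_KEYS:
--         found = ""
--         for entry in entry_list:
--             key, sep, value = entry.partition("=")
--             if sep and key.strip() == known:
--                 found = value.strip()
--         result[known] = found
--     return result
-- ===== Notes on version B (the rewrite author's own statement) =====
-- stated objective: alternative
-- what changed: B replaces A's single filtered dict-building pass (then a fixed-key dict lookup) by a schema-driven scan: for each of the five known keys it scans the entries for the last matching one, so no intermediate dict is built.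
import Mathlib
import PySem

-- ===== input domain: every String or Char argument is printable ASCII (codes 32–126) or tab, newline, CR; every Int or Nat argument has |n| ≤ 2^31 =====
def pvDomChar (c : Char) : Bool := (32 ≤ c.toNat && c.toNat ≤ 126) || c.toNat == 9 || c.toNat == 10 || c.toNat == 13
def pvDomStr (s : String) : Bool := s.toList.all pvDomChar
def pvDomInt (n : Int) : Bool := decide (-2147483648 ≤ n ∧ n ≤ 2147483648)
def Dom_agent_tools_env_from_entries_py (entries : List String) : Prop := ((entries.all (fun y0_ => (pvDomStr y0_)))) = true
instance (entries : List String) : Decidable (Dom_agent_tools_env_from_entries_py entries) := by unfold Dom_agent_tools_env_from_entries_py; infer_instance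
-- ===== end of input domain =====

-- B replaces A's single filtered dict-building pass by a schema-driven scan: for each of the
-- five known keys, find the last matching entry's stripped value (objective: alternative).

-- ===== PORT A =====

-- s.partition("=") for the single-char separator '=': (before, sep-found?, after); exact.
def pvPartitionEq (s : String) : String × Bool × String :=
  let cs := s.toList
  let pre := cs.takeWhile (fun c => c ≠ '=')
  match cs.dropWhile (fun c => c ≠ '=') with
  | [] => (String.ofList pre, false, "")
  | _ :: t => (String.ofList pre, true, String.ofList t)

def pvKnownKeys : List String :=
  ["AGENT_HUB_AGENT_TOOLS_URL", "AGENT_HUB_AGENT_TOOLS_TOKEN",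
   "AGENT_HUB_AGENT_TOOLS_PROJECT_ID", "AGENT_HUB_AGENT_TOOLS_CHAT_ID",
   "AGENT_HUB_READY_ACK_GUID"]

def pvStepA (d : PySem.Dict String String) (entry : String) : PySem.Dict String String :=
  let (key, sep, value) := pvPartitionEq entry
  let normalizedKey := PySem.Str.strip key
  if normalizedKey = "" ∨ sep = false then d
  else if normalizedKey ∈ pvKnownKeys then d.insert normalizedKey (PySem.Str.strip value)
  else d

def agent_tools_env_from_entries_py (entries : List String) : List (String × String) :=
  let envValues := entries.foldl pvStepA PySem.Dict.empty
  pvKnownKeys.map (fun k => (k, envValues.getD k ""))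

-- ===== PORT B =====

def pvLastValFor (entries : List String) (known : String) : String :=
  entries.foldl (fun found entry =>
    let (key, sep, value) := pvPartitionEq entry
    if sep = true ∧ PySem.Str.strip key = known then PySem.Str.strip value else found) ""

def agent_tools_env_from_entries_py_alt (entries : List String) : List (String × String) :=
  pvKnownKeys.map (fun known => (known, pvLastValFor entries known))

-- ===== PRECONDITION & SPEC =====
def Spec_agent_tools_env_from_entries_py (entries : List String) (out : List (String × String)) : Prop := out = agent_tools_env_from_entries_py_alt entries
instance (entries : List String) (out : List (String × String)) : Decidable (Spec_agent_tools_env_from_entries_py entries out) := by unfold Spec_agent_tools_env_from_entries_py; infer_instance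

-- ===== CLAIM (what is proved, stated in full; the proofs are below) =====
def Claim_equal_agent_tools_env_from_entries_py : Prop := ∀ (entries : List String), Dom_agent_tools_env_from_entries_py entries → Spec_agent_tools_env_from_entries_py entries (agent_tools_env_from_entries_py entries)

-- ===== LEMMAS AND PROOFS =====

-- B's inner fold as a function of the running accumulator.
def pvFoldB (entries : List String) (known : String) (acc : String) : String :=
  entries.foldl (fun found entry =>
    let (key, sep, value) := pvPartitionEq entry
    if sep = true ∧ PySem.Str.strip key = known then PySem.Str.strip value else found) acc

-- One entry: A's dict update, looked up at a known key k, is B's accumulator update.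
lemma pv_step_eq (d : PySem.Dict String String) (e k : String) (hk : k ∈ pvKnownKeys) :
    (pvStepA d e).getD k "" =
      (if (pvPartitionEq e).2.1 = true ∧ PySem.Str.strip (pvPartitionEq e).1 = k
        then PySem.Str.strip (pvPartitionEq e).2.2 else d.getD k "") := by
  have hkne : k ≠ "" := by
    intro h; subst h; revert hk; decide
  unfold pvStepA
  obtain ⟨key, sep, value⟩ := pvPartitionEq e
  simp only
  by_cases hskip : PySem.Str.strip key = "" ∨ sep = false
  · rw [if_pos hskip]
    rcases hskip with hempty | hnosep
    · rw [if_neg]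
      rintro ⟨-, hEq⟩
      exact hkne (hEq ▸ hempty)
    · rw [if_neg]
      rintro ⟨hsep, -⟩
      simp [hnosep] at hsep
  · rw [if_neg hskip]
    push Not at hskip
    obtain ⟨hne, hsep⟩ := hskip
    rw [Bool.ne_false_iff] at hsep
    by_cases hmem : PySem.Str.strip key ∈ pvKnownKeys
    · rw [if_pos hmem]
      by_cases heq : PySem.Str.strip key = k
      · rw [heq, PySem.Dict.getD_insert_self, if_pos ⟨hsep, rfl⟩]
      · rw [PySem.Dict.getD_insert_of_ne _ _ _ (fun h => heq h.symm),
          if_neg (fun h => heq h.2)]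
    · rw [if_neg hmem, if_neg]
      rintro ⟨-, heq⟩
      exact hmem (heq ▸ hk)

-- For a known key k, A's dict lookup after the fold equals B's last-wins scan.
lemma pv_loop_eq (entries : List String) (k : String) (hk : k ∈ pvKnownKeys)
    (d : PySem.Dict String String) :
    (entries.foldl pvStepA d).getD k "" = pvFoldB entries k (d.getD k "") := by
  induction entries generalizing d with
  | nil => rfl
  | cons e rest ih =>
    rw [List.foldl_cons, ih]
    show pvFoldB rest k ((pvStepA d e).getD k "") =
      pvFoldB rest k
        (if (pvPartitionEq e).2.1 = true ∧ PySem.Str.strip (pvPartitionEq e).1 = k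
          then PySem.Str.strip (pvPartitionEq e).2.2 else d.getD k "")
    rw [pv_step_eq d e k hk]

-- ===== VERDICT (by name: the statement is the Claim_ definition above) =====
theorem agent_tools_env_from_entries_py_spec : Claim_equal_agent_tools_env_from_entries_py := by
  intro entries _
  unfold Spec_agent_tools_env_from_entries_py agent_tools_env_from_entries_py
    agent_tools_env_from_entries_py_alt
  simp only
  apply List.map_congr_left
  intro k hk
  have := pv_loop_eq entries k hk PySem.Dict.empty
  simp only [pvLastValFor, pvFoldB] at *
  rw [this]
  congr 1
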